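-- pv_equiv track=rewrite | github.com/ernestderry/advent-of-code-2019 | python/day4/part1/main.py | hasNeverDecreasingDigits
-- ===== SOURCE A (Python) =====
-- def hasNeverDecreasingDigits(number):
--     hasNeverDecreasingDigits = True
--     previousDigit = 1
--     for character in str(number):
--         digit = int(character)
--         if digit < previousDigit:
--             hasNeverDecreasingDigits = False
--         previousDigit = digit
--
--     return hasNeverDecreasingDigits
-- ===== SOURCE B (Python) =====
-- def hasNeverDecreasingDigits(number):
--     seq = [1] + [int(c) for c in str(number)]
--     return seq == sorted(seq)
-- ===== Notes on version B (the rewrite author's own statement) =====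
-- stated objective: idiomatic
-- what changed: Replaces the explicit digit loop with previousDigit state by building the digit sequence (with A's leading-1 sentinel preserved) and comparing it to its sorted version.
import Mathlib
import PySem

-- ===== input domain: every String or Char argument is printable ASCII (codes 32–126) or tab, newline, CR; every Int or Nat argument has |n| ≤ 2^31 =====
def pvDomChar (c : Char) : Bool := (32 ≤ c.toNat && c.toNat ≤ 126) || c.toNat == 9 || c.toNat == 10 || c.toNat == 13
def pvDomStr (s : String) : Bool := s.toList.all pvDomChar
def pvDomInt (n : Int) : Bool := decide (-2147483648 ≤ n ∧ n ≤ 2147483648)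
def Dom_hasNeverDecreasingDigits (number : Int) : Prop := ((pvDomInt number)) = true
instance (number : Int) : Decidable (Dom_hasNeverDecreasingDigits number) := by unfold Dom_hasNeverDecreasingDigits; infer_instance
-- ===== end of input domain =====

-- B replaces A's explicit loop with previousDigit state by a sort-then-compare of the
-- digit sequence (A's leading-1 sentinel preserved); objective: idiomatic, not faster.


-- ===== PORT A =====
-- one loop step: state = some (hasNeverDecreasingDigits, previousDigit); none = ValueError from int(character)
def hndStep (st : Option (Bool × Int)) (c : Char) : Option (Bool × Int) :=
  match st with
  | none => none
  | some (h, prev) =>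
    match PySem.Int.ofChars? [c] with
    | none => none
    | some d => some ((if d < prev then false else h), d)

def hasNeverDecreasingDigits (number : Int) : Bool :=
  match (PySem.Int.toStr number).toList.foldl hndStep (some (true, 1)) with
  | some (h, _) => h
  | none => false   -- ValueError branch (the '-' of a negative number); unreachable under Pre_

-- ===== PORT B =====
def hasNeverDecreasingDigits_alt (number : Int) : Bool :=
  -- seq = [1] + [int(c) for c in str(number)]; getD 0 is the ValueError branch, unreachable under Pre_
  let seq : List Int := 1 :: (PySem.Int.toStr number).toList.map (fun c => (PySem.Int.ofChars? [c]).getD 0)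
  decide (seq = PySem.List.sorted seq (fun x => x))

-- ===== PRECONDITION & SPEC =====
-- Pre_ excludes exactly the negatives, where int('-') makes both A and B raise ValueError.
def Pre_hasNeverDecreasingDigits (number : Int) : Prop := 0 ≤ number
instance (number : Int) : Decidable (Pre_hasNeverDecreasingDigits number) := by unfold Pre_hasNeverDecreasingDigits; infer_instance
def pvWitness_hasNeverDecreasingDigits : Int := (123)

def Spec_hasNeverDecreasingDigits (number : Int) (out : Bool) : Prop := out = hasNeverDecreasingDigits_alt number
instance (number : Int) (out : Bool) : Decidable (Spec_hasNeverDecreasingDigits number out) := by unfold Spec_hasNeverDecreasingDigits; infer_instance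

-- ===== CLAIM (what is proved, stated in full; the proofs are below) =====
def Claim_equal_hasNeverDecreasingDigits : Prop := ∀ (number : Int), Dom_hasNeverDecreasingDigits number → Pre_hasNeverDecreasingDigits number → Spec_hasNeverDecreasingDigits number (hasNeverDecreasingDigits number)

-- ===== LEMMAS AND PROOFS =====

-- Boolean adjacent-nondecreasing check: the contract of A's loop
def chainB (p : Int) : List Int → Bool
  | [] => true
  | d :: ds => (decide (p ≤ d)) && chainB d ds

-- A's pure loop step (the some-branch of hndStep)
def step2 (st : Bool × Int) (d : Int) : Bool × Int := ((if d < st.2 then false else st.1), d)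

theorem fold_step2_fst (ds : List Int) : ∀ (h : Bool) (p : Int),
    (ds.foldl step2 (h, p)).1 = (h && chainB p ds) := by
  induction ds with
  | nil => intro h p; simp [chainB]
  | cons d ds ih =>
    intro h p
    simp only [List.foldl_cons, chainB]
    rw [show step2 (h, p) d = ((if d < p then false else h), d) from rfl, ih]
    by_cases hc : d < p
    · simp [hc, show ¬ p ≤ d by omega]
    · simp [hc, show p ≤ d by omega]

theorem chainB_iff (ds : List Int) : ∀ p : Int,
    chainB p ds = true ↔ (p :: ds).Pairwise (fun a b => a ≤ b) := by
  induction ds with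
  | nil => intro p; simp [chainB]
  | cons d ds ih =>
    intro p
    simp only [chainB, Bool.and_eq_true, decide_eq_true_eq, ih, List.pairwise_cons]
    constructor
    · rintro ⟨hpd, hall, hpw⟩
      refine ⟨?_, hall, hpw⟩
      intro x hx
      rcases List.mem_cons.1 hx with rfl | hx
      · exact hpd
      · exact le_trans hpd (hall x hx)
    · rintro ⟨hall, h2⟩
      exact ⟨hall d (by simp), h2⟩

theorem sorted_self_iff (l : List Int) :
    (l = PySem.List.sorted l (fun x => x)) ↔ l.Pairwise (fun a b => a ≤ b) := by
  constructor
  · intro h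
    have := PySem.List.sorted_pairwise l (fun x : Int => x)
    rw [← h] at this
    exact this
  · intro h
    exact (PySem.List.sorted_eq_self_of_pairwise l (fun x => x) h).symm

-- every character produced by Nat.toDigits 10 is a decimal digit character
theorem toDigitsCore_digits : ∀ (fuel n : Nat) (acc : List Char),
    (∀ c ∈ acc, ∃ d : Nat, d < 10 ∧ c = Nat.digitChar d) →
    ∀ c ∈ Nat.toDigitsCore 10 fuel n acc, ∃ d : Nat, d < 10 ∧ c = Nat.digitChar d := by
  intro fuel
  induction fuel with
  | zero => intro n acc hacc; simpa [Nat.toDigitsCore] using hacc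
  | succ fuel ih =>
    intro n acc hacc c hc
    rw [Nat.toDigitsCore] at hc
    have hd : ∀ c ∈ (Nat.digitChar (n % 10) :: acc), ∃ d : Nat, d < 10 ∧ c = Nat.digitChar d := by
      intro c hc
      rcases List.mem_cons.1 hc with rfl | hc
      · exact ⟨n % 10, Nat.mod_lt _ (by norm_num), rfl⟩
      · exact hacc c hc
    by_cases h0 : n / 10 = 0
    · rw [if_pos h0] at hc
      exact hd c hc
    · rw [if_neg h0] at hc
      exact ih (n / 10) _ hd c hc

theorem ofChars_digitChar (d : Nat) (hd : d < 10) :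
    PySem.Int.ofChars? [Nat.digitChar d] = some ((d : Int)) := by
  interval_cases d <;> decide

theorem fold_hndStep_some (cs : List Char) : ∀ (st : Bool × Int),
    (∀ c ∈ cs, PySem.Int.ofChars? [c] = some ((PySem.Int.ofChars? [c]).getD 0)) →
    cs.foldl hndStep (some st)
      = some ((cs.map (fun c => (PySem.Int.ofChars? [c]).getD 0)).foldl step2 st) := by
  induction cs with
  | nil => intro st _; simp
  | cons c cs ih =>
    intro st hcs
    obtain ⟨h, p⟩ := st
    have hc := hcs c (by simp)
    simp only [List.foldl_cons, List.map_cons]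
    rw [show hndStep (some (h, p)) c
          = (match PySem.Int.ofChars? [c] with
             | none => none
             | some d => some ((if d < p then false else h), d)) from rfl, hc]
    exact ih _ (fun c hc => hcs c (by simp [hc]))

-- ===== VERDICT (by name: the statement is the Claim_ definition above) =====
theorem hasNeverDecreasingDigits_spec : Claim_equal_hasNeverDecreasingDigits := by
  intro number _ hpre
  unfold Spec_hasNeverDecreasingDigits hasNeverDecreasingDigits hasNeverDecreasingDigits_alt
  have htoc : (PySem.Int.toStr number).toList = Nat.toDigits 10 number.toNat := by
    have h0 : (0:Int) ≤ number := hpre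
    rw [PySem.Int.toList_toStr, PySem.Int.toChars, if_neg (by omega)]
  set cs : List Char := Nat.toDigits 10 number.toNat with hcs
  have hdig : ∀ c ∈ cs, ∃ d : Nat, d < 10 ∧ c = Nat.digitChar d :=
    toDigitsCore_digits _ _ [] (by simp)
  have hsome : ∀ c ∈ cs, PySem.Int.ofChars? [c] = some ((PySem.Int.ofChars? [c]).getD 0) := by
    intro c hc
    obtain ⟨d, hd, rfl⟩ := hdig c hc
    rw [ofChars_digitChar d hd]
    rfl
  dsimp only
  rw [htoc, fold_hndStep_some cs _ hsome]
  set ds : List Int := cs.map (fun c => (PySem.Int.ofChars? [c]).getD 0) with hds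
  rw [show (match some ((ds.foldl step2 (true, 1))) with
        | some (h, _) => h
        | none => false) = (ds.foldl step2 (true, 1)).1 from rfl]
  rw [fold_step2_fst, Bool.true_and]
  by_cases hpw : (1 :: ds).Pairwise (fun a b : Int => a ≤ b)
  · rw [(chainB_iff ds 1).2 hpw, decide_eq_true ((sorted_self_iff (1 :: ds)).2 hpw)]
  · have h1 : chainB 1 ds = false := by
      cases h : chainB 1 ds
      · rfl
      · exact absurd ((chainB_iff ds 1).1 h) hpw
    have h2 : ¬ ((1 :: ds) = PySem.List.sorted (1 :: ds) (fun x => x)) := by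
      intro h; exact hpw ((sorted_self_iff (1 :: ds)).1 h)
    rw [h1, decide_eq_false h2]
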